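-- pv_equiv track=rewrite | github.com/ManojVirinchi/cis6930fa24-project1 | redactor.py | redact_preserving_special_chars
-- ===== SOURCE A (Python) =====
-- def redact_preserving_special_chars(text):
--     special_chars = '<>,.;:()[]{}/'
--     redacted = ''
--     for char in text:
--         if char in special_chars:
--             redacted += char
--         else:
--             redacted += '█'
--     return redacted
-- ===== SOURCE B (Python) =====
-- def redact_preserving_special_chars(text):
--     # Start from a fully redacted buffer, then restore each special character
--     # at the positions str.find locates for it.
--     buf = ['\u2588'] * len(text)
--     for sp in '<>,.;:()[]{}/':
--         start = 0
--         while True: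
--             i = text.find(sp, start)
--             if i == -1:
--                 break
--             buf[i] = sp
--             start = i + 1
--     return ''.join(buf)
-- ===== Notes on version B (the rewrite author's own statement) =====
-- stated objective: alternative
-- what changed: Instead of classifying each character in a Python-level loop with string concatenation, B builds an all-redacted buffer of the input's length and then, for each of the 13 special characters, scans the text with C-level str.find and writes that character back at each found position.
import Mathlib
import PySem

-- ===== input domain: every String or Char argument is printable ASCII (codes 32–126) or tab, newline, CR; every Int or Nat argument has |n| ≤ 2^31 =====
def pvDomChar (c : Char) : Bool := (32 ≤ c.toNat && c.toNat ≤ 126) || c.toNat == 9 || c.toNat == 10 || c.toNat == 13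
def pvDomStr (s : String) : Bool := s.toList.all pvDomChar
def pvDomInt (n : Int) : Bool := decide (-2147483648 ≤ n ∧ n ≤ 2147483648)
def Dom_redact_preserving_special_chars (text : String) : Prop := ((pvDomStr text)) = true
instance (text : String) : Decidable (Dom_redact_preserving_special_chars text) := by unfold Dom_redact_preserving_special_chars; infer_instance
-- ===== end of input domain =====

-- B replaces A's per-character classification pass by building a fully redacted buffer
-- and restoring each special character at the positions str.find locates (alternative
-- decomposition; return value proved equal).

-- ===== PORT A =====
-- A: loop over the characters, appending either the char (if special) or the block char.
def redact_preserving_special_chars (text : String) : String :=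
  text.toList.foldl
    (fun redacted char =>
      if ("<>,.;:()[]{}/".toList.contains char) then
        redacted ++ String.singleton char
      else
        redacted ++ "█") ""

-- ===== PORT B =====
-- text.find(sp, start): smallest index ≥ start holding sp, none for Python's -1.
def pyFindFrom (l : List Char) (sp : Char) (start : Nat) : Option Nat :=
  if h : start < l.length then
    if l[start] = sp then some start else pyFindFrom l sp (start + 1)
  else none
termination_by l.length - start

-- bounds of the found index (the inner loop's termination cites this)
theorem pyFindFrom_some_bounds (l : List Char) (sp : Char) (start i : Nat)
    (h : pyFindFrom l sp start = some i) : start ≤ i ∧ i < l.length := by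
  fun_induction pyFindFrom l sp start with
  | case1 s hlt heq => simp_all; omega
  | case2 s hlt hne ih => have := ih h; omega
  | case3 s hns => simp_all

-- the inner `while True` loop of B: restore sp wherever it occurs from position `start` on
def setSp (text : List Char) (sp : Char) (buf : List Char) (start : Nat) : List Char :=
  match h : pyFindFrom text sp start with
  | none => buf
  | some i => setSp text sp (buf.set i sp) (i + 1)
termination_by text.length - start
decreasing_by
  have := pyFindFrom_some_bounds text sp start i h
  omega

-- B: buf = ['█']*len(text); for sp in specials: find/overwrite loop; ''.join(buf)
def redact_preserving_special_chars_alt (text : String) : String :=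
  let chars := text.toList
  let buf0 := List.replicate chars.length '█'
  let buf := "<>,.;:()[]{}/".toList.foldl (fun b sp => setSp chars sp b 0) buf0
  String.ofList buf

-- ===== PRECONDITION & SPEC =====
def Spec_redact_preserving_special_chars (text : String) (out : String) : Prop := out = redact_preserving_special_chars_alt text
instance (text : String) (out : String) : Decidable (Spec_redact_preserving_special_chars text out) := by unfold Spec_redact_preserving_special_chars; infer_instance

-- ===== CLAIM (what is proved, stated in full; the proofs are below) =====
def Claim_equal_redact_preserving_special_chars : Prop := ∀ (text : String), Dom_redact_preserving_special_chars text → Spec_redact_preserving_special_chars text (redact_preserving_special_chars text)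

-- ===== LEMMAS AND PROOFS =====
theorem pyFindFrom_none (l : List Char) (sp : Char) (start : Nat)
    (h : pyFindFrom l sp start = none) :
    ∀ j, start ≤ j → l[j]? ≠ some sp := by
  fun_induction pyFindFrom l sp start with
  | case1 s hlt heq => simp_all
  | case2 s hlt hne ih =>
    intro j hj
    rcases Nat.eq_or_lt_of_le hj with rfl | hj'
    · simp_all [List.getElem?_eq_getElem hlt]
    · exact ih h j hj'
  | case3 s hns =>
    intro j hj hget
    obtain ⟨hjl, -⟩ := List.getElem?_eq_some_iff.mp hget
    omega

theorem pyFindFrom_some_spec (l : List Char) (sp : Char) (start i : Nat)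
    (h : pyFindFrom l sp start = some i) :
    start ≤ i ∧ i < l.length ∧ l[i]? = some sp ∧
      ∀ j, start ≤ j → j < i → l[j]? ≠ some sp := by
  fun_induction pyFindFrom l sp start with
  | case1 s hlt heq =>
    have hsi : s = i := by simpa using h
    subst hsi
    exact ⟨le_refl _, hlt, by simp [List.getElem?_eq_getElem hlt, heq], by omega⟩
  | case2 s hlt hne ih =>
    obtain ⟨h1, h2, h3, h4⟩ := ih h
    refine ⟨by omega, h2, h3, ?_⟩
    intro j hj hji
    rcases Nat.eq_or_lt_of_le hj with rfl | hj'
    · simp_all [List.getElem?_eq_getElem hlt]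
    · exact h4 j hj' hji
  | case3 s hns => simp_all

theorem setSp_getElem? (text : List Char) (sp : Char) (buf : List Char) (start : Nat) (k : Nat) :
    buf.length = text.length →
    (setSp text sp buf start)[k]? =
      (if start ≤ k ∧ text[k]? = some sp then some sp else buf[k]?) := by
  fun_induction setSp text sp buf start with
  | case1 buf start hnone =>
    intro _
    have hno := pyFindFrom_none text sp start hnone
    split_ifs with hc
    · exact absurd hc.2 (hno k hc.1)
    · rfl
  | case2 buf start i hsome ih =>
    intro hlen
    obtain ⟨hsi, hil, hti, hmin⟩ := pyFindFrom_some_spec text sp start i hsome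
    rw [ih (by simp [hlen])]
    by_cases hk : k = i
    · subst hk
      have hkb : k < buf.length := by omega
      rw [List.getElem?_set_self hkb]
      simp [hti, hsi]
    · rw [List.getElem?_set_ne (Ne.symm hk)]
      split_ifs with h1 h2 h2 <;> try rfl
      · exact absurd ⟨by omega, h1.2⟩ h2
      · have hkc : k < i := by
          rcases Nat.lt_or_ge k (i + 1) with hlt | hge
          · omega
          · exact absurd ⟨hge, h2.2⟩ h1
        exact absurd h2.2 (hmin k h2.1 hkc)

theorem setSp_zipWith (text : List Char) (sp : Char) (buf : List Char)
    (hlen : buf.length = text.length) :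
    setSp text sp buf 0 = List.zipWith (fun t b => if t = sp then sp else b) text buf := by
  apply List.ext_getElem?
  intro k
  rw [setSp_getElem? text sp buf 0 k hlen, List.getElem?_zipWith]
  cases ht : text[k]? with
  | none =>
    have hb : buf[k]? = none := by
      rw [List.getElem?_eq_none_iff] at ht ⊢; omega
    simp [ht, hb]
  | some t =>
    have hk : k < buf.length := by
      obtain ⟨hkt, -⟩ := List.getElem?_eq_some_iff.mp ht; omega
    rw [List.getElem?_eq_getElem hk]
    by_cases hts : t = sp <;> simp [hts, ht]

theorem zipWith_map_self (text : List Char) (sp : Char) (g : Char → Char) :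
    List.zipWith (fun t b => if t = sp then sp else b) text (text.map g)
      = text.map (fun t => if t = sp then sp else g t) := by
  induction text with
  | nil => rfl
  | cons c tc ih => simp [ih]

theorem fold_setSp (l : List Char) (text : List Char) (g : Char → Char) :
    l.foldl (fun b sp => setSp text sp b 0) (text.map g)
      = text.map (fun t => if l.contains t then t else g t) := by
  induction l generalizing g with
  | nil => simp
  | cons sp tl ih =>
    simp only [List.foldl_cons]
    rw [setSp_zipWith text sp _ (by simp), zipWith_map_self, ih]
    apply List.map_congr_left
    intro t _
    by_cases h1 : tl.contains t <;> by_cases h2 : t = sp <;>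
      simp [h1, h2, List.contains_cons]

theorem pv_foldl_eq (l : List Char) (acc : String) :
    l.foldl
      (fun redacted char =>
        if ("<>,.;:()[]{}/".toList.contains char) then
          redacted ++ String.singleton char
        else
          redacted ++ "█") acc
    = acc ++ String.ofList (l.map (fun c => if ("<>,.;:()[]{}/".toList.contains c) then c else '█')) := by
  induction l generalizing acc with
  | nil =>
    refine String.toList_injective ?_
    simp
  | cons c tl ih =>
    simp only [List.foldl_cons, List.map_cons, ih]
    by_cases h : ("<>,.;:()[]{}/".toList.contains c) = true <;>
      simp only [h, if_true, if_false, Bool.false_eq_true] <;>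
      refine String.toList_injective ?_ <;>
      simp [String.singleton, h]

-- ===== VERDICT (by name: the statement is the Claim_ definition above) =====
theorem redact_preserving_special_chars_spec : Claim_equal_redact_preserving_special_chars := by
  intro text _
  unfold Spec_redact_preserving_special_chars redact_preserving_special_chars redact_preserving_special_chars_alt
  rw [pv_foldl_eq]
  have hrep : List.replicate text.toList.length '█' = text.toList.map (fun _ => '█') := by
    simp
  simp only [hrep, fold_setSp]
  refine String.toList_injective ?_
  simp only [String.toList_append]
  congr 1
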